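-- pv_equiv track=rewrite | github.com/Dhairya-Khara/Stock-Prices-vs-Economic-Indicators | Autocomplete.py | get_top_five_stocks
-- ===== SOURCE A (Python) =====
-- def get_top_five_stocks(stock_substring, tickers):
--     """stuff"""
--     top_five = []
--     first_match_found = False
--     try:
--         for stock in tickers:
--             if stock_substring in stock and len(top_five) < 5:
--                 first_match_found = True
--                 top_five.append(stock)
--             else:
--                 if first_match_found:
--                     break
--         return top_five
--     except ValueError or IndexError:
--         return top_five
-- ===== SOURCE B (Python) =====
-- def get_top_five_stocks(stock_substring, tickers):
--     """Precompute a match mask, locate the run start and end by index search, then slice."""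
--     mask = [stock_substring in t for t in tickers]
--     if True not in mask:
--         return []
--     start = mask.index(True)
--     tail = mask[start:]
--     run_len = tail.index(False) if False in tail else len(tail)
--     return tickers[start:start + min(run_len, 5)]
-- ===== Notes on version B (the rewrite author's own statement) =====
-- stated objective: alternative
-- what changed: Replaced the stateful flag-and-break loop by index arithmetic: precompute a boolean match mask over all tickers, find the run start with mask.index(True) and the run end with an index search for False, then return one list slice capped at five.
import Mathlib
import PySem

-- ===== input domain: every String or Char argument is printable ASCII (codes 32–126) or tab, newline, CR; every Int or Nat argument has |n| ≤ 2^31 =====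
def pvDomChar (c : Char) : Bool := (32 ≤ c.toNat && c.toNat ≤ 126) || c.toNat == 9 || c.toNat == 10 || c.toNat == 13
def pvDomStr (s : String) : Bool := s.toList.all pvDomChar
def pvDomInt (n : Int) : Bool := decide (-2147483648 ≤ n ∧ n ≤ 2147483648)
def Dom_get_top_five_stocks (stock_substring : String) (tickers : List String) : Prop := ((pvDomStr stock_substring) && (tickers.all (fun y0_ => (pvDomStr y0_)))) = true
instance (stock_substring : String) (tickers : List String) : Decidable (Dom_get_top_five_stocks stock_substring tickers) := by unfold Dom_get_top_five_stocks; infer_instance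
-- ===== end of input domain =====

-- B replaces A's stateful flag-and-break loop by index arithmetic on a precomputed match mask
-- (mask.index(True) for the run start, an index search for False for the run end, one capped slice);
-- alternative decomposition, same cost.

-- ===== PORT A =====
-- A's loop with state (top_five, first_match_found); the `break` is the `found` branch.
def pvLoopA (sub : String) : List String → List String → Bool → List String
  | [], acc, _ => acc
  | s :: rest, acc, found =>
    if PySem.Str.isIn sub s && decide (acc.length < 5) then
      pvLoopA sub rest (acc ++ [s]) true
    else if found then acc else pvLoopA sub rest acc found

def get_top_five_stocks (stock_substring : String) (tickers : List String) : List String :=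
  pvLoopA stock_substring tickers [] false

-- ===== PORT B =====
-- Transliteration of Source B: mask = [sub in t for t in tickers]; if True not in mask: [];
-- start = mask.index(True) (the guard makes index? some, so .getD 0 is never taken);
-- tail = mask[start:] (slice from a nonnegative index = drop); run_len = tail.index(False) if
-- False in tail else len(tail); tickers[start:start+min(run_len,5)] = (drop start).take (min run_len 5)
-- (slice with natural bounds start, start+k).
def get_top_five_stocks_alt (stock_substring : String) (tickers : List String) : List String :=
  let mask := tickers.map (fun t => PySem.Str.isIn stock_substring t)
  if mask.contains true then
    let start := (PySem.List.index? mask true).getD 0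
    let tail := mask.drop start
    let run_len := if tail.contains false then (PySem.List.index? tail false).getD 0 else tail.length
    (tickers.drop start).take (min run_len 5)
  else []

-- ===== PRECONDITION & SPEC =====
def Spec_get_top_five_stocks (stock_substring : String) (tickers : List String) (out : List String) : Prop := out = get_top_five_stocks_alt stock_substring tickers
instance (stock_substring : String) (tickers : List String) (out : List String) : Decidable (Spec_get_top_five_stocks stock_substring tickers out) := by unfold Spec_get_top_five_stocks; infer_instance

-- ===== CLAIM (what is proved, stated in full; the proofs are below) =====
def Claim_equal_get_top_five_stocks : Prop := ∀ (stock_substring : String) (tickers : List String), Dom_get_top_five_stocks stock_substring tickers → Spec_get_top_five_stocks stock_substring tickers (get_top_five_stocks stock_substring tickers)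

-- ===== LEMMAS AND PROOFS =====

-- A side: once a match was found, the loop appends the matching prefix of the rest, capped at 5.
theorem pvLoopA_found (sub : String) (ts : List String) :
    ∀ acc : List String, pvLoopA sub ts acc true =
      acc ++ (ts.takeWhile (fun s => PySem.Str.isIn sub s)).take (5 - acc.length) := by
  induction ts with
  | nil => intro acc; simp [pvLoopA]
  | cons s rest ih =>
    intro acc
    by_cases hp : PySem.Str.isIn sub s = true
    · by_cases hl : acc.length < 5
      · rw [pvLoopA]
        simp only [hp, hl, decide_true, Bool.and_self, if_true]
        rw [ih]
        have h5 : 5 - acc.length = (5 - (acc ++ [s]).length) + 1 := by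
          simp; omega
        have hp' : PySem.Chars.isIn sub.toList s.toList = true := by
          simpa [PySem.Str.isIn] using hp
        simp [List.takeWhile, hp', h5, List.take_succ_cons]
      · rw [pvLoopA]
        simp only [hp, hl, decide_false, Bool.and_false, Bool.false_eq_true, if_false, if_true]
        have : 5 - acc.length = 0 := by omega
        simp [this]
    · rw [pvLoopA]
      have hp' : PySem.Chars.isIn sub.toList s.toList = false := by
        simpa [PySem.Str.isIn] using hp
      simp [PySem.Str.isIn, hp', List.takeWhile]

-- A side: A equals "skip non-matches, take the matching run, cap at 5".
theorem pvLoopA_pipeline (sub : String) (ts : List String) :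
    pvLoopA sub ts [] false =
      (((ts.dropWhile (fun s => !(PySem.Str.isIn sub s))).takeWhile
          (fun s => PySem.Str.isIn sub s)).take 5) := by
  induction ts with
  | nil => simp [pvLoopA]
  | cons s rest ih =>
    by_cases hp : PySem.Chars.isIn sub.toList s.toList = true
    · rw [pvLoopA]
      simp only [PySem.Str.isIn_eq, hp, List.length_nil, decide_true, Bool.and_self, if_true,
        List.nil_append, show (0:Nat) < 5 from by omega]
      rw [pvLoopA_found]
      simp [PySem.Str.isIn, List.dropWhile, hp]
    · rw [pvLoopA]
      simp only [PySem.Str.isIn_eq, hp, Bool.false_and, Bool.false_eq_true, if_false]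
      rw [ih]
      simp [PySem.Str.isIn, List.dropWhile, hp]

-- B side: the run-length computed from the mask cuts the list exactly at its matching prefix.
theorem pvRunLen (p : String → Bool) (l : List String) :
    l.take (if (l.map p).contains false
            then (PySem.List.index? (l.map p) false).getD 0
            else (l.map p).length) = l.takeWhile p := by
  induction l with
  | nil => simp
  | cons x l ih =>
    by_cases hp : p x = true
    · by_cases hf : (l.map p).contains false = true
      · have hmem : false ∈ l.map p := by simpa using hf
        obtain ⟨k, hk⟩ := Option.isSome_iff_exists.mp
          ((PySem.List.index?_isSome_iff (l.map p) false).mpr hmem)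
        have hcons : PySem.List.index? ((x :: l).map p) false = some (k + 1) := by
          simp only [List.map_cons, hp]
          rw [PySem.List.index?_cons_of_ne (l.map p) (by decide), hk]; rfl
        have hfc : ((x :: l).map p).contains false = true := by
          rw [List.map_cons, List.contains_cons, hf]; simp
        rw [if_pos hfc, hcons]
        simp only [Option.getD_some, List.take_succ_cons, List.takeWhile_cons_of_pos hp]
        rw [← ih, if_pos hf, hk]
        simp
      · have hall : ∀ y ∈ l, p y = true := by simpa using hf
        have hfc : ¬ ((x :: l).map p).contains false = true := by
          simpa [hp] using hall
        rw [if_neg hfc, List.length_map, List.length_cons,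
          List.take_succ_cons, List.takeWhile_cons_of_pos hp, List.take_length,
          List.takeWhile_eq_self_iff.mpr hall]
    · have hp' : p x = false := by simpa using hp
      have hfc : ((x :: l).map p).contains false = true := by
        rw [List.map_cons, List.contains_cons, hp']; simp
      have h0 : PySem.List.index? ((x :: l).map p) false = some 0 := by
        simp only [List.map_cons, hp']
        exact PySem.List.index?_cons_self _ _
      rw [if_pos hfc, h0]
      simp [List.takeWhile_cons_of_neg, hp']

-- B side: B equals the same pipeline.
theorem pvAlt_pipeline (sub : String) (ts : List String) :
    get_top_five_stocks_alt sub ts =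
      (((ts.dropWhile (fun s => !(PySem.Str.isIn sub s))).takeWhile
          (fun s => PySem.Str.isIn sub s)).take 5) := by
  induction ts with
  | nil => simp [get_top_five_stocks_alt]
  | cons s rest ih =>
    by_cases hp : PySem.Str.isIn sub s = true
    · -- head matches: start = 0, tail = whole mask; reduce to pvRunLen
      have hpc : PySem.Chars.isIn sub.toList s.toList = true := by simpa using hp
      have hmem : ((s :: rest).map (fun t => PySem.Str.isIn sub t)).contains true = true := by
        rw [List.map_cons, List.contains_cons, hp]; simp
      have hidx : PySem.List.index? ((s :: rest).map (fun t => PySem.Str.isIn sub t)) true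
          = some 0 := by
        simp only [List.map_cons, hp]
        exact PySem.List.index?_cons_self _ _
      have hdw : (s :: rest).dropWhile (fun t => !(PySem.Str.isIn sub t)) = s :: rest := by
        simp [hpc]
      unfold get_top_five_stocks_alt
      rw [if_pos hmem, hidx]
      simp only [Option.getD_some, List.drop_zero, hdw]
      rw [min_comm, ← List.take_take, pvRunLen (fun t => PySem.Str.isIn sub t) (s :: rest)]
    · have hp' : PySem.Str.isIn sub s = false := by simpa using hp
      have hpc : PySem.Chars.isIn sub.toList s.toList = false := by simpa using hp'
      have hdw : (s :: rest).dropWhile (fun t => !(PySem.Str.isIn sub t))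
          = rest.dropWhile (fun t => !(PySem.Str.isIn sub t)) := by
        simp [hpc]
      by_cases hm : (rest.map (fun t => PySem.Str.isIn sub t)).contains true = true
      · -- head fails: start shifts by one, everything else is rest's computation
        have hmemr : true ∈ rest.map (fun t => PySem.Str.isIn sub t) := by simpa using hm
        obtain ⟨k, hk⟩ := Option.isSome_iff_exists.mp
          ((PySem.List.index?_isSome_iff (rest.map (fun t => PySem.Str.isIn sub t)) true).mpr hmemr)
        have hmem : ((s :: rest).map (fun t => PySem.Str.isIn sub t)).contains true = true := by
          rw [List.map_cons, List.contains_cons, hm]; simp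
        have hidx : PySem.List.index? ((s :: rest).map (fun t => PySem.Str.isIn sub t)) true
            = some (k + 1) := by
          simp only [List.map_cons, hp']
          rw [PySem.List.index?_cons_of_ne (rest.map (fun t => PySem.Str.isIn sub t)) (by decide),
            hk]; rfl
        unfold get_top_five_stocks_alt
        rw [if_pos hmem, hidx]
        simp only [Option.getD_some, List.map_cons, hp', List.drop_succ_cons]
        rw [hdw, ← ih]
        unfold get_top_five_stocks_alt
        rw [if_pos hm, hk]
        rfl
      · -- no match anywhere: both sides are []
        have hallr : ∀ y ∈ rest, PySem.Str.isIn sub y = false := by simpa using hm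
        have hmem : ¬ ((s :: rest).map (fun t => PySem.Str.isIn sub t)).contains true = true := by
          simp only [List.map_cons, List.contains_cons, hp']
          simpa using hm
        have hdnil : (s :: rest).dropWhile (fun t => !(PySem.Str.isIn sub t)) = [] := by
          rw [List.dropWhile_eq_nil_iff]
          intro x hx
          rcases List.mem_cons.mp hx with h | h
          · subst h; simp [hpc]
          · simpa using hallr x h
        unfold get_top_five_stocks_alt
        rw [if_neg hmem, hdnil]
        simp

-- ===== VERDICT (by name: the statement is the Claim_ definition above) =====
theorem get_top_five_stocks_spec : Claim_equal_get_top_five_stocks := by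
  intro sub ts _
  unfold Spec_get_top_five_stocks get_top_five_stocks
  rw [pvAlt_pipeline, pvLoopA_pipeline]
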